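-- pv_equiv track=rewrite | github.com/nocdem/cellframehub | plugin/hub.py | get_block_reward_transactions
-- ===== SOURCE A (Python) =====
-- def get_block_reward_transactions(history):
--     reward_transactions = []
--     lines = history.splitlines()
--     i = 0
--     while i < len(lines):
--         line = lines[i]
--         if "status: ACCEPTED" in line:
--             for j in range(i, i + 35):
--                 if j < len(lines) and "service: block_reward" in lines[j]:
--                     reward_transactions.append("\n".join(lines[i:i + 35]))
--                     break
--         i += 1
--     return reward_transactions
-- ===== SOURCE B (Python) =====
-- def get_block_reward_transactions(history):
--     lines = history.splitlines()
--     n = len(lines)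
--     # nxt[k] = smallest j >= k with "service: block_reward" in lines[j], or n if none
--     nxt = [n] * (n + 1)
--     for j in range(n - 1, -1, -1):
--         nxt[j] = j if "service: block_reward" in lines[j] else nxt[j + 1]
--     return ["\n".join(lines[i:i + 35])
--             for i in range(n)
--             if "status: ACCEPTED" in lines[i] and nxt[i] < min(i + 35, n)]
-- ===== Notes on version B (the rewrite author's own statement) =====
-- stated objective: alternative
-- what changed: Replaces A's per-ACCEPTED-line rescan of each 35-line window by a single backward pass that precomputes for every line index the next 'service: block_reward' index, so each ACCEPTED line is decided by one array lookup.
import Mathlib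
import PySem

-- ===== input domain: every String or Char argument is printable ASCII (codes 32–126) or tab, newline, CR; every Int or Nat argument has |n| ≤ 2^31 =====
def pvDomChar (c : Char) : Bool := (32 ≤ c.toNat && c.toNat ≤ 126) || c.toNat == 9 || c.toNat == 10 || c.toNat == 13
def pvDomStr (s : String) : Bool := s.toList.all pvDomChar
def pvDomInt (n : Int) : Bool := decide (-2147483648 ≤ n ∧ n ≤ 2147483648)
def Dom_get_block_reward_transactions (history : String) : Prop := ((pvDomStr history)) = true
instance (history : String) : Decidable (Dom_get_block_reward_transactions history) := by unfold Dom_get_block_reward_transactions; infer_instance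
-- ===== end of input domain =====

-- B replaces A's rescanning of each 35-line window by a single backward pass that
-- precomputes, for every line, the next 'service: block_reward' line index (objective: alternative decomposition).

-- ===== PORT A =====
-- literal transliteration: while-loop over i = foldl over range; the 'for j … break' inner
-- scan appends once iff some j in [i, i+35) with j < len(lines) has the service marker.
def get_block_reward_transactions (history : String) : List String :=
  let lines := PySem.Str.splitlines history
  (List.range lines.length).foldl (fun acc i =>
    let line := lines.getD i ""
    if PySem.Str.isIn "status: ACCEPTED" line then
      if (List.range' i 35).any (fun j =>
            decide (j < lines.length) &&
            PySem.Str.isIn "service: block_reward" (lines.getD j "")) then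
        acc ++ [PySem.Str.join "\n" (PySem.List.slice lines (some (i : Int)) (some ((i : Int) + 35)))]
      else acc
    else acc) []

-- ===== PORT B =====
-- backward pass of Source B: pvMkNxt lines i builds the list nxt[i..n] with sentinel n at the end;
-- nxt[k] = first index ≥ k whose line contains the service marker, or n if none.
def pvMkNxt (lines : List String) (i : Nat) : List Nat :=
  match lines with
  | [] => [i]
  | l :: rest =>
      let t := pvMkNxt rest (i + 1)
      (if PySem.Str.isIn "service: block_reward" l then i else t.headD 0) :: t

def get_block_reward_transactions_alt (history : String) : List String :=
  let lines := PySem.Str.splitlines history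
  let n := lines.length
  let nxt := pvMkNxt lines 0
  ((List.range n).filter (fun i =>
      PySem.Str.isIn "status: ACCEPTED" (lines.getD i "") &&
      decide (nxt.getD i 0 < min (i + 35) n))).map
    (fun (i : Nat) => PySem.Str.join "\n" (PySem.List.slice lines (some (i : Int)) (some ((i : Int) + 35))))

-- ===== PRECONDITION & SPEC =====
def Spec_get_block_reward_transactions (history : String) (out : List String) : Prop := out = get_block_reward_transactions_alt history
instance (history : String) (out : List String) : Decidable (Spec_get_block_reward_transactions history out) := by unfold Spec_get_block_reward_transactions; infer_instance

-- ===== CLAIM (what is proved, stated in full; the proofs are below) =====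
def Claim_equal_get_block_reward_transactions : Prop := ∀ (history : String), Dom_get_block_reward_transactions history → Spec_get_block_reward_transactions history (get_block_reward_transactions history)

-- ===== LEMMAS AND PROOFS =====

-- proof-side characterisation of the backward pass: first service index ≥ i, sentinel i + length
def pvFirstRew : List String → Nat → Nat
  | [], i => i
  | l :: r, i => if PySem.Str.isIn "service: block_reward" l then i else pvFirstRew r (i + 1)

theorem pvFirstRew_ge (ls : List String) (i : Nat) : i ≤ pvFirstRew ls i := by
  induction ls generalizing i with
  | nil => simp [pvFirstRew]
  | cons l r ih =>
      simp only [pvFirstRew]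
      split
      · exact le_rfl
      · exact le_trans (Nat.le_succ i) (ih (i + 1))

theorem pvMkNxt_getD (ls : List String) (i0 k : Nat) (hk : k ≤ ls.length) :
    (pvMkNxt ls i0).getD k 0 = pvFirstRew (ls.drop k) (i0 + k) := by
  induction ls generalizing i0 k with
  | nil =>
      have hk0 : k = 0 := by simpa using hk
      subst hk0
      simp [pvMkNxt, pvFirstRew]
  | cons l r ih =>
      cases k with
      | zero =>
          simp only [pvMkNxt, List.getD_cons_zero, List.drop_zero, pvFirstRew, Nat.add_zero]
          split
          · rfl
          · have h0 : (pvMkNxt r (i0 + 1)).headD 0 = (pvMkNxt r (i0 + 1)).getD 0 0 := by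
              cases pvMkNxt r (i0 + 1) <;> rfl
            rw [h0, ih (i0 + 1) 0 (Nat.zero_le _)]
            simp
      | succ m =>
          simp only [pvMkNxt, List.getD_cons_succ, List.drop_succ_cons]
          rw [ih (i0 + 1) m (by simpa using hk)]
          ring_nf

theorem pvWindow (lines : List String) (W i : Nat) (hi : i ≤ lines.length) :
    ((List.range' i W).any (fun j =>
        decide (j < lines.length) &&
        PySem.Str.isIn "service: block_reward" (lines.getD j "")))
      = decide (pvFirstRew (lines.drop i) i < min (i + W) lines.length) := by
  induction W generalizing i with
  | zero =>
      have h1 : i ≤ pvFirstRew (lines.drop i) i := pvFirstRew_ge _ _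
      have h2 : ¬ pvFirstRew (lines.drop i) i < min (i + 0) lines.length := by omega
      simp only [List.range'_zero, List.any_nil]
      exact (decide_eq_false h2).symm
  | succ W ih =>
      rcases Nat.lt_or_ge i lines.length with hlt | hge
      · have hdrop : lines.drop i = lines[i] :: lines.drop (i + 1) :=
          List.drop_eq_getElem_cons hlt
        have hgetD : lines.getD i "" = lines[i] := List.getD_eq_getElem lines "" hlt
        have hfr : pvFirstRew (lines.drop i) i =
            if PySem.Str.isIn "service: block_reward" lines[i] then i
            else pvFirstRew (lines.drop (i + 1)) (i + 1) := by
          rw [hdrop]; rfl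
        rw [List.range'_succ, List.any_cons, hgetD, hfr, ih (i + 1) hlt]
        cases hr : PySem.Str.isIn "service: block_reward" lines[i] with
        | true =>
            have hm : i < min (i + (W + 1)) lines.length := by omega
            simp [hlt, hm]
        | false =>
            rw [show i + 1 + W = i + (W + 1) from by omega]
            simp
      · have hdrop : lines.drop i = [] := List.drop_eq_nil_of_le hge
        have hfr : pvFirstRew (lines.drop i) i = i := by rw [hdrop]; rfl
        have hany : ((List.range' i (W + 1)).any (fun j =>
            decide (j < lines.length) &&
            PySem.Str.isIn "service: block_reward" (lines.getD j ""))) = false := by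
          apply List.any_eq_false.mpr
          intro j hj
          have hij : i ≤ j := (List.mem_range'_1.mp hj).1
          have hjn : ¬ j < lines.length := by omega
          simp [hjn]
        rw [hany, hfr]
        have h2 : ¬ i < min (i + (W + 1)) lines.length := by omega
        simp [h2]

theorem pvMain (lines : List String) :
    (List.range lines.length).foldl (fun acc i =>
      if PySem.Str.isIn "status: ACCEPTED" (lines.getD i "") then
        if (List.range' i 35).any (fun j =>
              decide (j < lines.length) &&
              PySem.Str.isIn "service: block_reward" (lines.getD j "")) then
          acc ++ [PySem.Str.join "\n" (PySem.List.slice lines (some (i : Int)) (some ((i : Int) + 35)))]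
        else acc
      else acc) []
    = ((List.range lines.length).filter (fun i =>
        PySem.Str.isIn "status: ACCEPTED" (lines.getD i "") &&
        decide ((pvMkNxt lines 0).getD i 0 < min (i + 35) lines.length))).map
      (fun (i : Nat) => PySem.Str.join "\n" (PySem.List.slice lines (some (i : Int)) (some ((i : Int) + 35)))) := by
  have hstep : ∀ (acc : List String) (i : Nat), i ∈ List.range lines.length →
      (if PySem.Str.isIn "status: ACCEPTED" (lines.getD i "") then
        if (List.range' i 35).any (fun j =>
              decide (j < lines.length) &&
              PySem.Str.isIn "service: block_reward" (lines.getD j "")) then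
          acc ++ [PySem.Str.join "\n" (PySem.List.slice lines (some (i : Int)) (some ((i : Int) + 35)))]
        else acc
      else acc)
      = (if (PySem.Str.isIn "status: ACCEPTED" (lines.getD i "") &&
            decide ((pvMkNxt lines 0).getD i 0 < min (i + 35) lines.length)) then
          acc ++ [PySem.Str.join "\n" (PySem.List.slice lines (some (i : Int)) (some ((i : Int) + 35)))]
        else acc) := by
    intro acc i hi
    have hilt : i ≤ lines.length := Nat.le_of_lt (List.mem_range.mp hi)
    rw [pvMkNxt_getD lines 0 i hilt, Nat.zero_add, ← pvWindow lines 35 i hilt]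
    cases hs : PySem.Str.isIn "status: ACCEPTED" (lines.getD i "") with
    | false => simp
    | true => rw [Bool.true_and, if_pos rfl]
  refine (PySem.List.foldl_congr_mem _ _
      (fun (acc : List String) (i : Nat) =>
        if (PySem.Str.isIn "status: ACCEPTED" (lines.getD i "") &&
            decide ((pvMkNxt lines 0).getD i 0 < min (i + 35) lines.length)) then
          acc ++ [PySem.Str.join "\n" (PySem.List.slice lines (some (i : Int)) (some ((i : Int) + 35)))]
        else acc) _ hstep).trans ?_
  rw [PySem.List.foldl_append_if]
  simp

-- ===== VERDICT (by name: the statement is the Claim_ definition above) =====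
theorem get_block_reward_transactions_spec : Claim_equal_get_block_reward_transactions := by
  intro history _
  unfold Spec_get_block_reward_transactions get_block_reward_transactions get_block_reward_transactions_alt
  exact pvMain (PySem.Str.splitlines history)
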